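-- pv_equiv track=rewrite | github.com/chasemad/mini-xdr-v5 | backend/app/adaptive_detection.py | _count_parameter_mutations
-- ===== SOURCE A (Python) =====
-- from collections import Counter, defaultdict
-- from typing import Any, Dict, List, Optional, Tuple
--
-- def _count_parameter_mutations(parameters: List[str]) -> int:
--     """Count parameter mutation attempts"""
--     if not parameters:
--         return 0
--
--     # Look for systematic parameter variations
--     param_groups = defaultdict(list)
--     for param in parameters:
--         base_param = param.split("=")[0] if "=" in param else param
--         param_groups[base_param].append(param)
--
--     mutations = 0
--     for param_name, variations in param_groups.items():
--         if len(variations) > 3:  # Multiple variations of same parameter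
--             mutations += len(variations)
--
--     return mutations
-- ===== SOURCE B (Python) =====
-- def _count_parameter_mutations(parameters):
--     """Count parameter mutation attempts (sort-then-scan over base names)"""
--     bases = sorted(p.split("=")[0] if "=" in p else p for p in parameters)
--     total = 0
--     i = 0
--     n = len(bases)
--     while i < n:
--         j = i
--         while j < n and bases[j] == bases[i]:
--             j += 1
--         if j - i > 3:
--             total += j - i
--         i = j
--     return total
-- ===== Notes on version B (the rewrite author's own statement) =====
-- stated objective: alternative
-- what changed: Replaces the dict-of-lists grouping pass plus items iteration with extracting all base names, sorting them, and scanning consecutive equal runs, adding each run length that exceeds 3.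
import Mathlib
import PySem

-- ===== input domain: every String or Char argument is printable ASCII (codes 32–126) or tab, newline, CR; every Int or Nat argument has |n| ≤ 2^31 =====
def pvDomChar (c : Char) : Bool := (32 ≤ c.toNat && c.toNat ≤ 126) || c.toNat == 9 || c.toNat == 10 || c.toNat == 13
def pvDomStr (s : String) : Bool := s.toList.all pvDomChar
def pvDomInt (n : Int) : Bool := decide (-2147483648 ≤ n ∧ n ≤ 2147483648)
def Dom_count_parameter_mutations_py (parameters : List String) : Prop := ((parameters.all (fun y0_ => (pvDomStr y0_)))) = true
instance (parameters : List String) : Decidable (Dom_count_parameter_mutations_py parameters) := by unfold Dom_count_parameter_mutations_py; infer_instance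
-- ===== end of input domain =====

-- B replaces A's dict-of-lists grouping with sort-then-scan over base names (an alternative algorithm, not claimed faster).

-- ===== PORT A =====
-- shared base-name extraction: both Pythons contain the identical expression
-- `param.split("=")[0] if "=" in param else param`; split? with sep "=" is always
-- `some` (sep nonempty) and Python's split never returns [], so getD/headD defaults are never hit
def pvBase (p : String) : String :=
  if PySem.Str.isIn "=" p then (((PySem.Str.split? p "=").getD []).headD "") else p

def count_parameter_mutations_py (parameters : List String) : Int :=
  if parameters = [] then 0
  else
    let param_groups : PySem.Dict String (List String) :=
      parameters.foldl (fun d param => d.modify (pvBase param) [] (· ++ [param])) PySem.Dict.empty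
    param_groups.items.foldl
      (fun mutations kv => if kv.2.length > 3 then mutations + (kv.2.length : Int) else mutations) 0

-- ===== PORT B =====
-- the outer while-loop of Source B: consume one run of equal (sorted) base names per step
def pvRunScan : List String → Int
  | [] => 0
  | x :: rest =>
      let run := rest.takeWhile (· == x)
      let n := run.length + 1
      (if n > 3 then (n : Int) else 0) + pvRunScan (rest.dropWhile (· == x))
termination_by l => l.length
decreasing_by
  simp only [List.length_cons]
  exact Nat.lt_succ_of_le (List.length_dropWhile_le _ _)

def count_parameter_mutations_py_alt (parameters : List String) : Int :=
  pvRunScan (PySem.List.sorted (parameters.map pvBase) (fun x => x) false)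

-- ===== PRECONDITION & SPEC =====
def Spec_count_parameter_mutations_py (parameters : List String) (out : Int) : Prop := out = count_parameter_mutations_py_alt parameters
instance (parameters : List String) (out : Int) : Decidable (Spec_count_parameter_mutations_py parameters out) := by unfold Spec_count_parameter_mutations_py; infer_instance

-- ===== CLAIM (what is proved, stated in full; the proofs are below) =====
def Claim_equal_count_parameter_mutations_py : Prop := ∀ (parameters : List String), Dom_count_parameter_mutations_py parameters → Spec_count_parameter_mutations_py parameters (count_parameter_mutations_py parameters)

-- ===== LEMMAS AND PROOFS =====
-- run-length sum of a sorted list equals the sum over any distinct key list of its counts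
theorem runscan_eq (l : List String) (hp : l.Pairwise (· ≤ ·)) :
    ∀ (K : List String), K.Nodup → (∀ k, k ∈ K ↔ k ∈ l) →
      pvRunScan l = (K.map (fun k => if l.count k > 3 then (l.count k : Int) else 0)).sum := by
  induction l using pvRunScan.induct with
  | case1 =>
      intro K hK hmem
      have : K = [] := List.eq_nil_iff_forall_not_mem.mpr (fun k hk => by simpa using (hmem k).mp hk)
      simp [this, pvRunScan]
  | case2 x rest ih =>
      intro K hK hmem
      have hrest : rest.takeWhile (fun y => y == x) ++ rest.dropWhile (fun y => y == x) = rest :=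
        List.takeWhile_append_dropWhile
      have htkall : ∀ y ∈ rest.takeWhile (fun y => y == x), y = x :=
        fun y hy => eq_of_beq (@List.mem_takeWhile_imp String (fun y => y == x) rest y hy)
      have hxrest : ∀ y ∈ rest, x ≤ y := fun y hy => List.rel_of_pairwise_cons hp hy
      have hpt : (rest.dropWhile (fun y => y == x)).Pairwise (· ≤ ·) :=
        List.Pairwise.sublist (List.dropWhile_sublist _) hp.of_cons
      have hxt : x ∉ rest.dropWhile (fun y => y == x) := by
        cases hteq : rest.dropWhile (fun y => y == x) with
        | nil => simp
        | cons h t' =>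
          have hh : (h == x) = false := by
            have := @List.head_dropWhile_not String (fun y => y == x) rest
            simp [hteq] at this; simpa using this
          have hhne : h ≠ x := by simpa using hh
          have hhrest : h ∈ rest := (List.dropWhile_sublist _).mem (hteq ▸ List.mem_cons_self ..)
          have hxh : x < h := lt_of_le_of_ne (hxrest h hhrest) (Ne.symm hhne)
          intro hmemx
          rcases List.mem_cons.mp hmemx with rfl | hx'
          · exact hhne rfl
          · have : h ≤ x := by
              have hpt' := hteq ▸ hpt
              exact List.rel_of_pairwise_cons hpt' hx'
            exact absurd (lt_of_lt_of_le hxh this) (lt_irrefl x)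
      have hct0 : (rest.dropWhile (fun y => y == x)).count x = 0 := List.count_eq_zero.mpr hxt
      have hctk : (rest.takeWhile (fun y => y == x)).count x = (rest.takeWhile (fun y => y == x)).length :=
        List.count_eq_length.mpr (fun b hb => (htkall b hb).symm)
      have hcx : (x :: rest).count x = (rest.takeWhile (fun y => y == x)).length + 1 := by
        rw [List.count_cons_self]
        conv_lhs => rw [← hrest]
        rw [List.count_append, hctk, hct0]
      have hck : ∀ k, k ≠ x → (x :: rest).count k = (rest.dropWhile (fun y => y == x)).count k := by
        intro k hkx
        have h1 : (rest.takeWhile (fun y => y == x)).count k = 0 :=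
          List.count_eq_zero.mpr (fun hk => hkx (htkall k hk))
        rw [List.count_cons_of_ne (Ne.symm hkx)]
        conv_lhs => rw [← hrest]
        rw [List.count_append, h1, Nat.zero_add]
      have hxK : x ∈ K := (hmem x).mpr (List.mem_cons_self ..)
      have hKe : ∀ k, k ∈ K.erase x ↔ k ∈ rest.dropWhile (fun y => y == x) := by
        intro k
        rw [hK.mem_erase_iff]
        constructor
        · rintro ⟨hne, hkK⟩
          rcases List.mem_cons.mp ((hmem k).mp hkK) with rfl | hkr
          · exact absurd rfl hne
          · rcases List.mem_append.mp (hrest ▸ hkr) with hkt | hkd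
            · exact absurd (htkall k hkt) hne
            · exact hkd
        · intro hkt
          refine ⟨fun h => hxt (h ▸ hkt), (hmem k).mpr ?_⟩
          exact List.mem_cons_of_mem x ((List.dropWhile_sublist _).mem hkt)
      have hsum : (K.map (fun k => if (x :: rest).count k > 3 then ((x :: rest).count k : Int) else 0)).sum
          = (if (x :: rest).count x > 3 then ((x :: rest).count x : Int) else 0)
            + ((K.erase x).map (fun k => if (x :: rest).count k > 3 then ((x :: rest).count k : Int) else 0)).sum := by
        have := ((List.perm_cons_erase hxK).map
          (fun k => if (x :: rest).count k > 3 then ((x :: rest).count k : Int) else 0)).sum_eq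
        simpa using this
      have hih := ih hpt (K.erase x) (hK.erase x) hKe
      have hmapcongr : ((K.erase x).map (fun k => if (x :: rest).count k > 3 then ((x :: rest).count k : Int) else 0))
          = ((K.erase x).map (fun k => if (rest.dropWhile (fun y => y == x)).count k > 3 then ((rest.dropWhile (fun y => y == x)).count k : Int) else 0)) := by
        refine List.map_congr_left (fun k hk => ?_)
        have hne : k ≠ x := ((hK.mem_erase_iff).mp hk).1
        rw [hck k hne]
      rw [pvRunScan, hsum, hmapcongr, ← hih, hcx]

theorem A_sum (parameters : List String) :
    (parameters.foldl (fun d param => d.modify (pvBase param) [] (· ++ [param]))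
        (PySem.Dict.empty : PySem.Dict String (List String))).items.foldl
      (fun mutations kv => if kv.2.length > 3 then mutations + (kv.2.length : Int) else mutations) 0
    = ((PySem.Set.ofList (parameters.map pvBase)).map
        (fun k => if (parameters.map pvBase).count k > 3 then ((parameters.map pvBase).count k : Int) else 0)).sum := by
  set d := parameters.foldl (fun d param => d.modify (pvBase param) [] (· ++ [param]))
    (PySem.Dict.empty : PySem.Dict String (List String)) with hd
  have hkeys : d.keys = PySem.Set.ofList (parameters.map pvBase) := by
    rw [hd, PySem.Dict.keys_foldl_modify_key parameters pvBase [] (fun _ param => (· ++ [param])),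
      PySem.Dict.keys_empty, PySem.Set.update_nil_left]
  have hnodup : d.keys.Nodup := by
    rw [hd]
    exact PySem.Dict.nodup_keys_foldl_modify_key parameters pvBase [] _ _ (by simp [PySem.Dict.keys_empty])
  have hlen : ∀ k, (d.getD k []).length = (parameters.map pvBase).count k := by
    intro k
    have hd2 : d = (parameters.map (fun p => (pvBase p, p))).foldl
        (fun d q => d.modify q.1 [] (fun v => v ++ [q.2])) PySem.Dict.empty := by
      rw [hd, List.foldl_map]
    rw [hd2, PySem.Dict.getD_foldl_modify_append, PySem.Dict.getD_empty, List.nil_append,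
      List.length_map, ← List.countP_eq_length_filter, List.countP_map, List.count_eq_countP, List.countP_map]
    rfl
  rw [PySem.Dict.items_eq_map_keys d hnodup [], List.foldl_map]
  have hbody : (fun (m : Int) (k : String) =>
        if ((k, d.getD k []) : String × List String).2.length > 3 then m + (((k, d.getD k []).2.length : Nat) : Int) else m)
      = fun (m : Int) (k : String) => m + (if (d.getD k []).length > 3 then ((d.getD k []).length : Int) else 0) := by
    funext m k
    by_cases h : (d.getD k []).length > 3 <;> simp [h]
  rw [hbody, PySem.List.foldl_add, hkeys]
  simp only [hlen, Int.zero_add]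

theorem final (parameters : List String) :
    count_parameter_mutations_py parameters = count_parameter_mutations_py_alt parameters := by
  by_cases hnil : parameters = []
  · subst hnil
    have h0 : PySem.List.sorted ([] : List String) (fun x => x) false = [] := rfl
    simp [count_parameter_mutations_py, count_parameter_mutations_py_alt, h0, pvRunScan]
  · rw [count_parameter_mutations_py]
    simp only [if_neg hnil]
    rw [A_sum, count_parameter_mutations_py_alt]
    have hpair : (PySem.List.sorted (parameters.map pvBase) (fun x => x) false).Pairwise (· ≤ ·) := by
      have := PySem.List.sorted_pairwise (parameters.map pvBase) (fun x => x)
      simpa using this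
    have hperm := PySem.List.sorted_perm (parameters.map pvBase) (fun x => x) false
    rw [runscan_eq _ hpair (PySem.Set.ofList (parameters.map pvBase)) (PySem.Set.nodup_ofList _)
      (fun k => by rw [PySem.Set.mem_ofList, PySem.List.mem_sorted])]
    exact congrArg List.sum (List.map_congr_left (fun k _ => by rw [hperm.count_eq k]))

-- ===== VERDICT (by name: the statement is the Claim_ definition above) =====
theorem count_parameter_mutations_py_spec : Claim_equal_count_parameter_mutations_py := by
  intro parameters _
  unfold Spec_count_parameter_mutations_py
  exact final parameters
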